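-- pv_equiv track=rewrite | github.com/zkytony/thortils | thortils/scene.py | ithor_scene_names
-- ===== SOURCE A (Python) =====
-- def ithor_scene_names(scene_type="kitchen", levels=None):
--     """
--     Returns a list of scene names.
--
--     Args:
--         scene_type (str): type of scene e.g. kitchen
--         levels (enumerable): the levels you want to include.
--             Note that this should always contain numbers greater than
--             or equal to 1 and less than or equal to 30,
--             regardless of scene_type.
--     """
--     if levels is not None:
--         if max(levels) > 30 or min(levels) < 1:
--             raise ValueError("Invalid levels. Must be >= 1 and < 31")
--     scenes = dict(
--         kitchen = [f"FloorPlan{i}" for i in range(1, 31)],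
--         living_room = [f"FloorPlan{200 + i}" for i in range(1, 31)],
--         bedroom = [f"FloorPlan{300 + i}" for i in range(1, 31)],
--         bathroom = [f"FloorPlan{400 + i}" for i in range(1, 31)]
--     )
--     if scene_type.lower() in scenes:
--         if levels is None:
--             return scenes[scene_type]
--         else:
--             return [scenes[scene_type][i-1] for i in levels]
--     raise ValueError("Unknown scene type {}".format(scene_type))
-- ===== SOURCE B (Python) =====
-- def ithor_scene_names(scene_type="kitchen", levels=None):
--     if levels is not None:
--         if max(levels) > 30 or min(levels) < 1:
--             raise ValueError("Invalid levels. Must be >= 1 and < 31")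
--     offsets = {"kitchen": 0, "living_room": 200, "bedroom": 300, "bathroom": 400}
--     key = scene_type.lower()
--     if key in offsets:
--         base = offsets[key]
--         return ["FloorPlan{}".format(base + i)
--                 for i in (range(1, 31) if levels is None else levels)]
--     raise ValueError("Unknown scene type {}".format(scene_type))
-- ===== Notes on version B (the rewrite author's own statement) =====
-- stated objective: simpler
-- what changed: B replaces the four precomputed 30-element lists and list indexing by a dict of numeric base offsets and a direct f-string formula base+i, keying the lookup on the lowercased scene_type.
-- outside the precondition, e.g. on ithor_scene_names('Kitchen', [12, 11]): A raises KeyError, B returns ['FloorPlan12', 'FloorPlan11']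
-- crash fix: On scene types that equal one of the four known keys only after lowercasing (mixed or upper case), A raises KeyError while B returns the scene names for the lowercased type. — e.g. on ithor_scene_names("Kitchen", some [12, 11]): A raises KeyError, B returns ["FloorPlan12", "FloorPlan11"]
import Mathlib
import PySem

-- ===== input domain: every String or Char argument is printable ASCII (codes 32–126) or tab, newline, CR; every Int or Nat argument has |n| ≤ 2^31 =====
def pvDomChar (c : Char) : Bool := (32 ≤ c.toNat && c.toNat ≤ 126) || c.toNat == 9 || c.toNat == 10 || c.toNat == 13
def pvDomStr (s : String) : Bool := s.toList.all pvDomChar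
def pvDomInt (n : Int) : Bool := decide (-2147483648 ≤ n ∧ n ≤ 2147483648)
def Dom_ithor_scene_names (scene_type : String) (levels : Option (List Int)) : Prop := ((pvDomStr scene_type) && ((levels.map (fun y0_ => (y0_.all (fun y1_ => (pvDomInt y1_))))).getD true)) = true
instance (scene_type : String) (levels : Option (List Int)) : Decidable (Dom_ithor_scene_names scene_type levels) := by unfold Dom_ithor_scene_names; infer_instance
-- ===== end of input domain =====

-- B replaces A's four precomputed 30-element name lists and list indexing by a dict of
-- numeric base offsets and the direct formula "FloorPlan"+(base+i); where A raises
-- (bad/empty levels, unknown or mixed-case scene type) B may differ — excluded by Pre_.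


-- shared helper: both Pythons begin with the identical two-line levels validation
-- (false = the validation raises: empty levels, or max > 30, or min < 1)
def pvLevelsOk (levels : Option (List Int)) : Bool :=
  match levels with
  | none => true
  | some ls =>
    match PySem.List.max? ls (fun x => x), PySem.List.min? ls (fun x => x) with
    | some mx, some mn => !(mx > 30 || mn < 1)
    | _, _ => false      -- max()/min() on an empty sequence raises ValueError

-- ===== PORT A =====
-- A-side helper: the `scenes` dict of four full 30-name lists
def pvScenes : PySem.Dict String (List String) :=
  ((((PySem.Dict.empty).insert "kitchen"
        ((PySem.List.pyRange 1 31 1).map (fun i => "FloorPlan" ++ PySem.Int.toStr i))).insert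
      "living_room"
        ((PySem.List.pyRange 1 31 1).map (fun i => "FloorPlan" ++ PySem.Int.toStr (200 + i)))).insert
      "bedroom"
        ((PySem.List.pyRange 1 31 1).map (fun i => "FloorPlan" ++ PySem.Int.toStr (300 + i)))).insert
      "bathroom"
        ((PySem.List.pyRange 1 31 1).map (fun i => "FloorPlan" ++ PySem.Int.toStr (400 + i)))

-- Python raises (ValueError/KeyError/IndexError) exactly outside Pre_; there the port returns [].
def ithor_scene_names (scene_type : String) (levels : Option (List Int)) : List String :=
  if pvLevelsOk levels then
    if pvScenes.contains (PySem.Str.lower scene_type) then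
      match levels with
      | none => (pvScenes.get? scene_type).getD []        -- KeyError → [] (outside Pre_)
      | some ls =>
        ls.map (fun i => PySem.List.pyGetD ((pvScenes.get? scene_type).getD []) (i - 1) "")
    else []                                               -- ValueError: unknown scene type
  else []                                                 -- ValueError: invalid levels

-- ===== PORT B =====
-- B-side helper: the `offsets` dict of numeric base offsets
def pvOffsets : PySem.Dict String Int :=
  ((((PySem.Dict.empty).insert "kitchen" 0).insert "living_room" 200).insert
      "bedroom" 300).insert "bathroom" 400

-- B looks up a numeric base offset under the lowercased key and formats each name directly.
def ithor_scene_names_alt (scene_type : String) (levels : Option (List Int)) : List String :=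
  if pvLevelsOk levels then
    match pvOffsets.get? (PySem.Str.lower scene_type) with
    | some base =>
      (match levels with
       | none => PySem.List.pyRange 1 31 1
       | some ls => ls).map (fun i => "FloorPlan" ++ PySem.Int.toStr (base + i))
    | none => []                                          -- ValueError: unknown scene type
  else []                                                 -- ValueError: invalid levels

-- ===== PRECONDITION & SPEC =====
-- Pre_ = exactly where the Python A returns normally: the raw scene_type is one of the four
-- lowercase keys (on mixed case like "Kitchen" A raises KeyError) and levels, if given, is
-- nonempty with every entry in 1..30 (otherwise A raises ValueError).
def Pre_ithor_scene_names (scene_type : String) (levels : Option (List Int)) : Prop :=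
  (scene_type = "kitchen" ∨ scene_type = "living_room" ∨ scene_type = "bedroom" ∨ scene_type = "bathroom") ∧
  (∀ ls ∈ levels, ls ≠ [] ∧ ∀ i ∈ ls, 1 ≤ i ∧ i ≤ 30)
instance (scene_type : String) (levels : Option (List Int)) : Decidable (Pre_ithor_scene_names scene_type levels) := by unfold Pre_ithor_scene_names; infer_instance
def pvWitness_ithor_scene_names : String × Option (List Int) := ("bedroom", some [5, 20, 15])

-- On scene types that equal one of the four known keys only after lowercasing (mixed or
-- upper case) A raises KeyError (the lowercased membership test passes but the raw dict
-- lookup fails) while B returns the scene names for the lowercased type.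
def Raises_ithor_scene_names (scene_type : String) (levels : Option (List Int)) : Prop :=
  (PySem.Str.lower scene_type = "kitchen" ∨ PySem.Str.lower scene_type = "living_room" ∨
   PySem.Str.lower scene_type = "bedroom" ∨ PySem.Str.lower scene_type = "bathroom") ∧
  ¬(scene_type = "kitchen" ∨ scene_type = "living_room" ∨ scene_type = "bedroom" ∨ scene_type = "bathroom") ∧
  (∀ ls ∈ levels, ls ≠ [] ∧ ∀ i ∈ ls, 1 ≤ i ∧ i ≤ 30)
instance (scene_type : String) (levels : Option (List Int)) : Decidable (Raises_ithor_scene_names scene_type levels) := by unfold Raises_ithor_scene_names; infer_instance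
def pvRaiseWitness_ithor_scene_names : String × Option (List Int) := ("Kitchen", some [12, 11])
def pvRaiseWitnessOut_ithor_scene_names : List String := ["FloorPlan12", "FloorPlan11"]

def Spec_ithor_scene_names (scene_type : String) (levels : Option (List Int)) (out : List String) : Prop := out = ithor_scene_names_alt scene_type levels
instance (scene_type : String) (levels : Option (List Int)) (out : List String) : Decidable (Spec_ithor_scene_names scene_type levels out) := by unfold Spec_ithor_scene_names; infer_instance

-- ===== CLAIM (what is proved, stated in full; the proofs are below) =====
def Claim_equal_ithor_scene_names : Prop := ∀ (scene_type : String) (levels : Option (List Int)), Dom_ithor_scene_names scene_type levels → Pre_ithor_scene_names scene_type levels → Spec_ithor_scene_names scene_type levels (ithor_scene_names scene_type levels)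
def Claim_raises_ithor_scene_names : Prop := (∀ (scene_type : String) (levels : Option (List Int)), Dom_ithor_scene_names scene_type levels → Raises_ithor_scene_names scene_type levels → ¬ Pre_ithor_scene_names scene_type levels) ∧ (Dom_ithor_scene_names (pvRaiseWitness_ithor_scene_names.1) (pvRaiseWitness_ithor_scene_names.2) ∧ Raises_ithor_scene_names (pvRaiseWitness_ithor_scene_names.1) (pvRaiseWitness_ithor_scene_names.2) ∧ ithor_scene_names_alt (pvRaiseWitness_ithor_scene_names.1) (pvRaiseWitness_ithor_scene_names.2) = pvRaiseWitnessOut_ithor_scene_names)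

-- ===== LEMMAS AND PROOFS =====

-- indexing into A's precomputed range-map list equals B's direct formula
theorem pv_elt (f : Int → String) (i : Int) (h1 : 1 ≤ i) (h2 : i ≤ 30) :
    PySem.List.pyGetD ((PySem.List.pyRange 1 31 1).map f) (i - 1) "" = f i := by
  have hi : i - 1 = (((i - 1).toNat : Nat) : Int) := by omega
  rw [hi, PySem.List.pyGetD_map_pyRange_one f 1 31 (i - 1).toNat "" (by omega)]
  congr 1
  omega

theorem pv_levelsOk (ls : List Int) (hne : ls ≠ []) (hb : ∀ i ∈ ls, 1 ≤ i ∧ i ≤ 30) :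
    pvLevelsOk (some ls) = true := by
  show (match PySem.List.max? ls (fun x => x), PySem.List.min? ls (fun x => x) with
        | some mx, some mn => !(mx > 30 || mn < 1)
        | _, _ => false) = true
  rcases hmx : PySem.List.max? ls (fun x => x) with _ | mx
  · exact absurd ((PySem.List.max?_eq_none_iff ls fun x => x).mp hmx) hne
  rcases hmn : PySem.List.min? ls (fun x => x) with _ | mn
  · exact absurd ((PySem.List.min?_eq_none_iff ls fun x => x).mp hmn) hne
  have hmx30 : mx ≤ 30 := (hb _ (PySem.List.max?_mem hmx)).2
  have hmn1 : 1 ≤ mn := (hb _ (PySem.List.min?_mem hmn)).1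
  simp
  omega

-- ===== VERDICT (by name: the statement is the Claim_ definition above) =====
theorem ithor_scene_names_spec : Claim_equal_ithor_scene_names := by
  intro st lv _ hpre
  obtain ⟨hst, hlv⟩ := hpre
  unfold Spec_ithor_scene_names ithor_scene_names ithor_scene_names_alt
  have hok : pvLevelsOk lv = true := by
    rcases lv with _ | ls
    · rfl
    · exact pv_levelsOk ls (hlv ls rfl).1 (hlv ls rfl).2
  rw [if_pos hok, if_pos hok]
  rcases hst with h | h | h | h <;> subst h <;> rcases lv with _ | ls
  · decide
  · obtain ⟨hne, hb⟩ := hlv ls rfl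
    rw [if_pos (show pvScenes.contains (PySem.Str.lower "kitchen") = true from by decide),
        show pvOffsets.get? (PySem.Str.lower "kitchen") = some 0 from by decide]
    refine List.map_congr_left fun i hi => ?_
    rw [show (pvScenes.get? "kitchen").getD [] =
          (PySem.List.pyRange 1 31 1).map (fun j => "FloorPlan" ++ PySem.Int.toStr j) from by decide,
        pv_elt _ i (hb i hi).1 (hb i hi).2, zero_add]
  · decide
  · obtain ⟨hne, hb⟩ := hlv ls rfl
    rw [if_pos (show pvScenes.contains (PySem.Str.lower "living_room") = true from by decide),
        show pvOffsets.get? (PySem.Str.lower "living_room") = some 200 from by decide]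
    refine List.map_congr_left fun i hi => ?_
    rw [show (pvScenes.get? "living_room").getD [] =
          (PySem.List.pyRange 1 31 1).map (fun j => "FloorPlan" ++ PySem.Int.toStr (200 + j)) from by decide,
        pv_elt _ i (hb i hi).1 (hb i hi).2]
  · decide
  · obtain ⟨hne, hb⟩ := hlv ls rfl
    rw [if_pos (show pvScenes.contains (PySem.Str.lower "bedroom") = true from by decide),
        show pvOffsets.get? (PySem.Str.lower "bedroom") = some 300 from by decide]
    refine List.map_congr_left fun i hi => ?_
    rw [show (pvScenes.get? "bedroom").getD [] =
          (PySem.List.pyRange 1 31 1).map (fun j => "FloorPlan" ++ PySem.Int.toStr (300 + j)) from by decide,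
        pv_elt _ i (hb i hi).1 (hb i hi).2]
  · decide
  · obtain ⟨hne, hb⟩ := hlv ls rfl
    rw [if_pos (show pvScenes.contains (PySem.Str.lower "bathroom") = true from by decide),
        show pvOffsets.get? (PySem.Str.lower "bathroom") = some 400 from by decide]
    refine List.map_congr_left fun i hi => ?_
    rw [show (pvScenes.get? "bathroom").getD [] =
          (PySem.List.pyRange 1 31 1).map (fun j => "FloorPlan" ++ PySem.Int.toStr (400 + j)) from by decide,
        pv_elt _ i (hb i hi).1 (hb i hi).2]

@[simp]
theorem ithor_scene_names_raises : Claim_raises_ithor_scene_names := by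
  unfold Claim_raises_ithor_scene_names
  refine ⟨fun st lv _ hr hp => hr.2.1 hp.1, by decide⟩
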